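-- pv_equiv track=rewrite | github.com/imkuang/game_24 | utils.py | is_legal
-- ===== SOURCE A (Python) =====
-- def is_legal(exp_str, cards):
--     """
--     检查输入的表达式是否合法
--
--     :param exp_str: 用户输入的表达式，字符串类型
--     :param cards: 本次题目的牌组，是一个从小到大排好序的 tuple 型数组
--     :return: bool 型数据，合法返回 True，不合法返回 False
--     """
--     op_list = ["+", "-", "*", "/", "(", ")"]  # 所有合法的操作符
--     cards_used = []  # 存放表达式中所有用到的牌
--     tmp = ""
--     for ch in exp_str:
--         if ch.isdigit():
--             tmp += ch
--         elif ch in op_list: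
--             if tmp != "":
--                 cards_used.append(int(tmp))
--                 tmp = ""
--         else:
--             return False
--     if tmp != "":
--         cards_used.append(int(tmp))
--     cards_used.sort()
--     if cards != tuple(cards_used):  # 表达式中用到的牌和题目给的牌组不同时
--         return False
--     return True
-- ===== SOURCE B (Python) =====
-- import re
--
-- def is_legal(exp_str, cards):
--     # validate whole string in one pass, then extract maximal digit runs
--     if re.fullmatch(r'[0-9+\-*/()]*', exp_str) is None:
--         return False
--     return tuple(sorted(int(run) for run in re.findall(r'[0-9]+', exp_str))) == cards
-- ===== Notes on version B (the rewrite author's own statement) =====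
-- stated objective: idiomatic
-- what changed: Replaces A's stateful per-character accumulator with early returns by a regex validate-then-extract decomposition: one fullmatch character-class check rejects illegal strings, then re.findall of maximal digit runs is mapped through int, sorted and compared to cards.
import Mathlib
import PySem

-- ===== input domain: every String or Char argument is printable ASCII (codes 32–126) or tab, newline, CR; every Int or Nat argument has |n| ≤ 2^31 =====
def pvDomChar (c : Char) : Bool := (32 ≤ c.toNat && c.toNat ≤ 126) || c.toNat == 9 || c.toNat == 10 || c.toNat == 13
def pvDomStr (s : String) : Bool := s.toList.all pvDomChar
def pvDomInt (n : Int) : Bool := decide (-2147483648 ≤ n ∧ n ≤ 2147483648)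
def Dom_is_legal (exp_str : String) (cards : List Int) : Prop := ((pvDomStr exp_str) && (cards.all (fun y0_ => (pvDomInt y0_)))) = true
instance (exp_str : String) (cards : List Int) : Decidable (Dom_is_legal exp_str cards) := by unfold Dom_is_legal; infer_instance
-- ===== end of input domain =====

-- B replaces A's stateful per-character accumulator with a regex-style validate-then-extract
-- decomposition (whole-string character-class check, then maximal digit runs); objective: idiomatic.

-- ===== PORT A =====
-- int(tmp) where tmp is a nonempty digit run; PySem.Int.ofChars? is some there, .getD 0 is never taken
def pvIntOfDigits (cs : List Char) : Int := (PySem.Int.ofChars? cs).getD 0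

-- the for-loop of A: state = (cards_used, tmp); none = the early 'return False'
def isLegalLoop : List Char → List Int → List Char → Option (List Int)
  | [], used, tmp => some (if tmp ≠ [] then used ++ [pvIntOfDigits tmp] else used)
  | c :: cs, used, tmp =>
    if PySem.Chars.isdigit c then isLegalLoop cs used (tmp ++ [c])
    else if c ∈ ['+', '-', '*', '/', '(', ')'] then
      isLegalLoop cs (if tmp ≠ [] then used ++ [pvIntOfDigits tmp] else used) []
    else none

def is_legal (exp_str : String) (cards : List Int) : Bool :=
  match isLegalLoop exp_str.toList [] [] with
  | none => false
  | some used => decide (cards = PySem.List.sorted used (fun x => x) false)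

-- ===== PORT B =====
-- re.findall(r'[0-9]+', s) mapped through int(): the maximal digit runs, in order (exact: the
-- regex digit class is exactly PySem.Chars.isdigit on the ASCII domain)
def findIntRuns : List Char → List Int
  | [] => []
  | c :: cs =>
    if PySem.Chars.isdigit c then
      pvIntOfDigits (c :: cs.takeWhile PySem.Chars.isdigit)
        :: findIntRuns (cs.dropWhile PySem.Chars.isdigit)
    else findIntRuns cs
termination_by cs => cs.length
decreasing_by
  · exact Nat.lt_succ_of_le (List.length_dropWhile_le _ _)
  · exact Nat.lt_succ_self _

def is_legal_alt (exp_str : String) (cards : List Int) : Bool :=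
  -- re.fullmatch(r'[0-9+\-*/()]*', s): every char is a digit or one of the six operators
  if exp_str.toList.all (fun c => PySem.Chars.isdigit c || decide (c ∈ ['+', '-', '*', '/', '(', ')'])) then
    decide (PySem.List.sorted (findIntRuns exp_str.toList) (fun x => x) false = cards)
  else false

-- ===== PRECONDITION & SPEC =====
def Spec_is_legal (exp_str : String) (cards : List Int) (out : Bool) : Prop := out = is_legal_alt exp_str cards
instance (exp_str : String) (cards : List Int) (out : Bool) : Decidable (Spec_is_legal exp_str cards out) := by unfold Spec_is_legal; infer_instance

-- ===== CLAIM (what is proved, stated in full; the proofs are below) =====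
def Claim_equal_is_legal : Prop := ∀ (exp_str : String) (cards : List Int), Dom_is_legal exp_str cards → Spec_is_legal exp_str cards (is_legal exp_str cards)

-- ===== LEMMAS AND PROOFS =====

theorem takeWhile_digits_append (tmp rest : List Char)
    (h : tmp.all PySem.Chars.isdigit = true) :
    (tmp ++ rest).takeWhile PySem.Chars.isdigit = tmp ++ rest.takeWhile PySem.Chars.isdigit := by
  induction tmp with
  | nil => simp
  | cons t ts ih =>
    simp only [List.all_cons, Bool.and_eq_true] at h
    simp [h.1, ih h.2]

theorem dropWhile_digits_append (tmp rest : List Char)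
    (h : tmp.all PySem.Chars.isdigit = true) :
    (tmp ++ rest).dropWhile PySem.Chars.isdigit = rest.dropWhile PySem.Chars.isdigit := by
  induction tmp with
  | nil => simp
  | cons t ts ih =>
    simp only [List.all_cons, Bool.and_eq_true] at h
    simp [h.1, ih h.2]

theorem findIntRuns_cons_not_digit (c : Char) (hc : PySem.Chars.isdigit c = false)
    (cs : List Char) : findIntRuns (c :: cs) = findIntRuns cs := by
  rw [findIntRuns.eq_def]
  simp [hc]

theorem findIntRuns_digit_prefix (tmp : List Char) (htmp : tmp.all PySem.Chars.isdigit = true)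
    (hne : tmp ≠ []) (c : Char) (hc : PySem.Chars.isdigit c = false) (cs : List Char) :
    findIntRuns (tmp ++ c :: cs) = pvIntOfDigits tmp :: findIntRuns cs := by
  cases tmp with
  | nil => exact absurd rfl hne
  | cons t ts =>
    simp only [List.all_cons, Bool.and_eq_true] at htmp
    rw [List.cons_append, findIntRuns, if_pos htmp.1,
        takeWhile_digits_append ts (c :: cs) htmp.2,
        dropWhile_digits_append ts (c :: cs) htmp.2]
    simp [hc, findIntRuns_cons_not_digit c hc]

theorem findIntRuns_all_digits (tmp : List Char) (htmp : tmp.all PySem.Chars.isdigit = true) :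
    findIntRuns tmp = if tmp ≠ [] then [pvIntOfDigits tmp] else [] := by
  cases tmp with
  | nil => simp [findIntRuns]
  | cons t ts =>
    simp only [List.all_cons, Bool.and_eq_true] at htmp
    rw [findIntRuns, if_pos htmp.1]
    have h1 : ts.takeWhile PySem.Chars.isdigit = ts := List.takeWhile_eq_self_iff.mpr (by
      intro x hx; exact List.all_eq_true.mp htmp.2 x hx)
    have h2 : ts.dropWhile PySem.Chars.isdigit = [] := List.dropWhile_eq_nil_iff.mpr (by
      intro x hx; exact List.all_eq_true.mp htmp.2 x hx)
    simp [h1, h2, findIntRuns]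

theorem isLegalLoop_eq (cs : List Char) : ∀ (used : List Int) (tmp : List Char),
    tmp.all PySem.Chars.isdigit = true →
    isLegalLoop cs used tmp =
      if cs.all (fun c => PySem.Chars.isdigit c || decide (c ∈ ['+', '-', '*', '/', '(', ')'])) then
        some (used ++ findIntRuns (tmp ++ cs))
      else none := by
  induction cs with
  | nil =>
    intro used tmp htmp
    simp only [List.all_nil, List.append_nil, isLegalLoop,
      findIntRuns_all_digits tmp htmp]
    split <;> simp
  | cons c cs ih =>
    intro used tmp htmp
    by_cases hd : PySem.Chars.isdigit c = true
    · rw [isLegalLoop, if_pos hd, ih used (tmp ++ [c]) (by simp [List.all_append, htmp, hd])]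
      simp [hd, List.append_assoc]
    · rw [isLegalLoop, if_neg (by simp [hd])]
      have hd' : PySem.Chars.isdigit c = false := Bool.eq_false_iff.mpr hd
      by_cases hop : c ∈ ['+', '-', '*', '/', '(', ')']
      · rw [if_pos hop, ih _ [] rfl]
        have hall : (c :: cs).all
            (fun c => PySem.Chars.isdigit c || decide (c ∈ ['+', '-', '*', '/', '(', ')'])) =
            cs.all (fun c => PySem.Chars.isdigit c || decide (c ∈ ['+', '-', '*', '/', '(', ')'])) := by
          rw [List.all_cons, decide_eq_true hop, Bool.or_true, Bool.true_and]
        rw [hall]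
        split
        · by_cases htne : tmp ≠ []
          · rw [if_pos htne, findIntRuns_digit_prefix tmp htmp htne c hd' cs]
            simp
          · simp only [ne_eq, not_not] at htne
            subst htne
            simp [findIntRuns_cons_not_digit c hd']
        · rfl
      · rw [if_neg hop]
        have : (c :: cs).all
            (fun c => PySem.Chars.isdigit c || decide (c ∈ ['+', '-', '*', '/', '(', ')'])) = false := by
          rw [List.all_cons, hd', decide_eq_false hop, Bool.or_self, Bool.false_and]
        rw [this]
        simp

-- ===== VERDICT (by name: the statement is the Claim_ definition above) =====
theorem is_legal_spec : Claim_equal_is_legal := by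
  intro exp_str cards _
  unfold Spec_is_legal is_legal is_legal_alt
  rw [isLegalLoop_eq exp_str.toList [] [] rfl]
  by_cases hall : (exp_str.toList.all
      (fun c => PySem.Chars.isdigit c || decide (c ∈ ['+', '-', '*', '/', '(', ')']))) = true
  · rw [if_pos hall, if_pos hall]
    simp only [List.nil_append]
    exact decide_eq_decide.mpr eq_comm
  · rw [if_neg hall, if_neg hall]
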